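-- pv_equiv track=rewrite | github.com/nlavidas/Diachronic-Linguistics-Platform | scripts/collect_multilingual_retranslations.py | extract_period_from_title
-- ===== SOURCE A (Python) =====
-- def extract_period_from_title(title):
--     """Extract historical period from title"""
--     title_lower = title.lower()
--
--     if any(word in title_lower for word in ['16th', 'xvii', '1500', '1600']):
--         return '16th-17th_century'
--     elif any(word in title_lower for word in ['18th', 'xviii', '1700']):
--         return '18th_century'
--     elif any(word in title_lower for word in ['19th', 'xix', '1800']):
--         return '19th_century'
--     elif any(word in title_lower for word in ['20th', 'xx', '1900']):
--         return '20th_century'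
--     elif any(word in title_lower for word in ['medieval', 'byzantine']):
--         return 'Medieval_Byzantine'
--     elif any(word in title_lower for word in ['renaissance']):
--         return 'Renaissance'
--     else:
--         return 'Unknown_period'
-- ===== SOURCE B (Python) =====
-- KEYWORDS = [
--     ('16th', 0, '16th-17th_century'),
--     ('xvii', 0, '16th-17th_century'),
--     ('1500', 0, '16th-17th_century'),
--     ('1600', 0, '16th-17th_century'),
--     ('18th', 1, '18th_century'),
--     ('xviii', 1, '18th_century'),
--     ('1700', 1, '18th_century'),
--     ('19th', 2, '19th_century'),
--     ('xix', 2, '19th_century'),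
--     ('1800', 2, '19th_century'),
--     ('20th', 3, '20th_century'),
--     ('xx', 3, '20th_century'),
--     ('1900', 3, '20th_century'),
--     ('medieval', 4, 'Medieval_Byzantine'),
--     ('byzantine', 4, 'Medieval_Byzantine'),
--     ('renaissance', 5, 'Renaissance'),
-- ]
--
-- FIRST_CHARS = frozenset(kw[0] for kw, _, _ in KEYWORDS)
--
-- def extract_period_from_title(title):
--     """Extract historical period from title"""
--     t = title.lower()
--     best_rank, best_period = 6, 'Unknown_period'
--     for i in range(len(t)):
--         if t[i] in FIRST_CHARS:
--             for kw, rank, period in KEYWORDS: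
--                 if rank < best_rank and t.startswith(kw, i):
--                     best_rank, best_period = rank, period
--     return best_period
-- ===== Notes on version B (the rewrite author's own statement) =====
-- stated objective: alternative
-- what changed: Replaced the six-branch chain of whole-string substring-membership tests by a flat (keyword, rank, period) table and a matcher-style single left-to-right scan over the lowered title's positions: positions whose character starts no keyword are skipped via a precomputed first-character set, and at the remaining positions the lowest-rank keyword starting there is kept as the running best match.
import Mathlib
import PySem

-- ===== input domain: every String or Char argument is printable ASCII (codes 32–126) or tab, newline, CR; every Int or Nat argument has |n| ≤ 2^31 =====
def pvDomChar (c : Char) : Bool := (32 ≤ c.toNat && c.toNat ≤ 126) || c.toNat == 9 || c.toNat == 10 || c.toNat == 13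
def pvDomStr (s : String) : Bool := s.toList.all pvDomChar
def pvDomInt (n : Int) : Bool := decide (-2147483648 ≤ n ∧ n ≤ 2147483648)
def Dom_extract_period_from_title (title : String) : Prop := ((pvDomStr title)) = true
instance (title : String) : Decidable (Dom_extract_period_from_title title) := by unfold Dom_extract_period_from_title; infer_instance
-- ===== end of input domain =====

-- B replaces A's per-rule substring-membership chain by a matcher-style single left-to-right
-- scan of the lowered title, checking at each position which table keywords start there and
-- keeping the best (lowest-rank) match (objective: alternative).

-- ===== PORT A =====
def extract_period_from_title (title : String) : String :=
  let title_lower := PySem.Str.lower title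
  if ["16th", "xvii", "1500", "1600"].any (fun word => PySem.Str.isIn word title_lower) then
    "16th-17th_century"
  else if ["18th", "xviii", "1700"].any (fun word => PySem.Str.isIn word title_lower) then
    "18th_century"
  else if ["19th", "xix", "1800"].any (fun word => PySem.Str.isIn word title_lower) then
    "19th_century"
  else if ["20th", "xx", "1900"].any (fun word => PySem.Str.isIn word title_lower) then
    "20th_century"
  else if ["medieval", "byzantine"].any (fun word => PySem.Str.isIn word title_lower) then
    "Medieval_Byzantine"
  else if ["renaissance"].any (fun word => PySem.Str.isIn word title_lower) then
    "Renaissance"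
  else
    "Unknown_period"

-- ===== PORT B =====
-- the flat (keyword, rank, period) table of Source B
def KEYWORDS : List (String × Nat × String) :=
  [ ("16th", 0, "16th-17th_century"),
    ("xvii", 0, "16th-17th_century"),
    ("1500", 0, "16th-17th_century"),
    ("1600", 0, "16th-17th_century"),
    ("18th", 1, "18th_century"),
    ("xviii", 1, "18th_century"),
    ("1700", 1, "18th_century"),
    ("19th", 2, "19th_century"),
    ("xix", 2, "19th_century"),
    ("1800", 2, "19th_century"),
    ("20th", 3, "20th_century"),
    ("xx", 3, "20th_century"),
    ("1900", 3, "20th_century"),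
    ("medieval", 4, "Medieval_Byzantine"),
    ("byzantine", 4, "Medieval_Byzantine"),
    ("renaissance", 5, "Renaissance") ]

-- frozenset(kw[0] for kw, _, _ in KEYWORDS); kw[0] of these (nonempty) keywords is head?
def FIRST_CHARS : PySem.Set Char :=
  PySem.Set.ofList (KEYWORDS.filterMap (fun e => e.1.toList.head?))

-- the inner 'for kw, rank, period in KEYWORDS' loop at the current suffix s = t[i:]
-- ('t.startswith(kw, i)' is startswith of kw on the suffix t[i:])
def scanStep (s : List Char) (b : Nat × String) : Nat × String :=
  KEYWORDS.foldl
    (fun b e => if e.2.1 < b.1 ∧ PySem.Chars.startswith s e.1.toList then (e.2.1, e.2.2) else b) b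

-- the 'for i in range(len(t))' loop, as recursion over the suffixes t[i:] of t
def scanB : List Char → Nat × String → Nat × String
  | [], b => b
  | c :: rest, b =>
    scanB rest (if PySem.Set.contains FIRST_CHARS c then scanStep (c :: rest) b else b)

def extract_period_from_title_alt (title : String) : String :=
  let t := (PySem.Str.lower title).toList
  (scanB t (6, "Unknown_period")).2

-- ===== PRECONDITION & SPEC =====
def Spec_extract_period_from_title (title : String) (out : String) : Prop :=
  out = extract_period_from_title_alt title
instance (title : String) (out : String) : Decidable (Spec_extract_period_from_title title out) := by
  unfold Spec_extract_period_from_title; infer_instance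

-- ===== CLAIM (what is proved, stated in full; the proofs are below) =====
def Claim_equal_extract_period_from_title : Prop :=
  ∀ (title : String), Dom_extract_period_from_title title →
    Spec_extract_period_from_title title (extract_period_from_title title)

-- ===== LEMMAS AND PROOFS =====

-- rank → period, the function the table's third column computes
def periodOf (r : Nat) : String :=
  if r = 0 then "16th-17th_century"
  else if r = 1 then "18th_century"
  else if r = 2 then "19th_century"
  else if r = 3 then "20th_century"
  else if r = 4 then "Medieval_Byzantine"
  else if r = 5 then "Renaissance"
  else "Unknown_period"

-- rank-only min-fold over a keyword/rank list, with an arbitrary keyword predicate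
def mfold (P : String → Bool) (L : List (String × Nat)) (b : Nat) : Nat :=
  L.foldl (fun b e => if P e.1 then min b e.2 else b) b

def KWR : List (String × Nat) := KEYWORDS.map (fun e => (e.1, e.2.1))

theorem pairfold_eq (P : String → Bool) (L : List (String × Nat × String)) (b : Nat × String)
    (hL : ∀ e ∈ L, e.2.2 = periodOf e.2.1) (hb : b.2 = periodOf b.1) :
    L.foldl (fun b e => if e.2.1 < b.1 ∧ P e.1 then (e.2.1, e.2.2) else b) b
      = (mfold P (L.map fun e => (e.1, e.2.1)) b.1,
         periodOf (mfold P (L.map fun e => (e.1, e.2.1)) b.1)) := by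
  induction L generalizing b with
  | nil =>
    cases b with
    | mk b1 b2 => simp only [mfold, List.map_nil, List.foldl_nil] at hb ⊢; rw [hb]
  | cons e rest ih =>
    have he := hL e (by simp)
    have hrest : ∀ x ∈ rest, x.2.2 = periodOf x.2.1 := fun x hx => hL x (by simp [hx])
    simp only [List.foldl_cons, List.map_cons, mfold] at ih ⊢
    by_cases hp : P e.1 = true
    · by_cases hlt : e.2.1 < b.1
      · rw [if_pos ⟨hlt, hp⟩]
        have hmin : min b.1 e.2.1 = e.2.1 := Nat.min_eq_right (by omega)
        rw [ih (e.2.1, e.2.2) hrest he]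
        simp only [hp, if_true, hmin]
      · rw [if_neg (by tauto)]
        have hmin : min b.1 e.2.1 = b.1 := Nat.min_eq_left (by omega)
        rw [ih b hrest hb]
        simp only [hp, if_true, hmin]
    · rw [if_neg (by tauto)]
      rw [ih b hrest hb]
      simp only [hp, Bool.false_eq_true, if_false]

theorem mfold_le (P : String → Bool) (L : List (String × Nat)) (b : Nat) : mfold P L b ≤ b := by
  induction L generalizing b with
  | nil => simp [mfold]
  | cons e rest ih =>
    simp only [mfold, List.foldl_cons] at ih ⊢
    by_cases hp : P e.1 = true
    · simp only [hp, if_true]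
      exact le_trans (ih (min b e.2)) (by omega)
    · simpa [hp] using ih b

theorem mfold_min (P : String → Bool) (L : List (String × Nat)) (x b : Nat) :
    mfold P L (min x b) = min x (mfold P L b) := by
  induction L generalizing b with
  | nil => simp [mfold]
  | cons e rest ih =>
    simp only [mfold, List.foldl_cons] at ih ⊢
    by_cases hp : P e.1 = true
    · simp only [hp, if_true, min_assoc]
      exact ih (min b e.2)
    · simp only [hp, Bool.false_eq_true, if_false]
      exact ih b

theorem mfold_congr (P Q : String → Bool) (L : List (String × Nat)) (b : Nat)
    (h : ∀ e ∈ L, P e.1 = Q e.1) : mfold P L b = mfold Q L b := by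
  induction L generalizing b with
  | nil => rfl
  | cons e rest ih =>
    have he := h e (by simp)
    simp only [mfold, List.foldl_cons, he] at ih ⊢
    exact ih _ (fun x hx => h x (List.mem_cons_of_mem _ hx))

theorem mfold_false (P : String → Bool) (L : List (String × Nat)) (b : Nat)
    (h : ∀ e ∈ L, P e.1 = false) : mfold P L b = b := by
  induction L generalizing b with
  | nil => rfl
  | cons e rest ih =>
    simp only [mfold, List.foldl_cons, h e (by simp), Bool.false_eq_true, if_false] at ih ⊢
    exact ih _ (fun x hx => h x (List.mem_cons_of_mem _ hx))

theorem mfold_or (P Q : String → Bool) (L : List (String × Nat)) (b : Nat) :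
    mfold (fun k => P k || Q k) L b = mfold Q L (mfold P L b) := by
  induction L generalizing b with
  | nil => rfl
  | cons e rest ih =>
    simp only [mfold, List.foldl_cons] at ih ⊢
    by_cases hp : P e.1 = true <;> by_cases hq : Q e.1 = true <;>
      simp only [hp, hq, Bool.or_false, Bool.or_true, Bool.false_eq_true, if_true, if_false]
    · -- both fire: the inner fold's result is already ≤ e.2
      rw [ih (min b e.2)]
      have h1 : mfold P rest (min b e.2) ≤ e.2 :=
        le_trans (mfold_le P rest (min b e.2)) (by omega)
      have h2 : min (mfold P rest (min b e.2)) e.2 = mfold P rest (min b e.2) :=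
        Nat.min_eq_left h1
      simp only [mfold] at h2
      rw [h2]
    · exact ih (min b e.2)
    · -- only Q fires: pull the min out of the P-fold's seed
      rw [ih (min b e.2)]
      have h3 := mfold_min P rest e.2 b
      simp only [mfold] at h3
      rw [min_comm b e.2, h3, min_comm e.2 _]
    · exact ih b

-- one occurrence-check unrolling: sub occurs in c::t iff it starts there or occurs in t
theorem isIn_cons (sub : List Char) (c : Char) (t : List Char) :
    PySem.Chars.isIn sub (c :: t)
      = (PySem.Chars.startswith (c :: t) sub || PySem.Chars.isIn sub t) := by
  by_cases h : sub <+: (c :: t) ∨ sub <:+: t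
  · have h1 : PySem.Chars.isIn sub (c :: t) = true := by
      rw [PySem.Chars.isIn_iff_infix, List.infix_cons_iff]; exact h
    rw [h1]
    rcases h with h | h
    · have hs : PySem.Chars.startswith (c :: t) sub = true :=
        (PySem.Chars.startswith_iff (c :: t) sub).2 h
      simp [hs]
    · have hs : PySem.Chars.isIn sub t = true := (PySem.Chars.isIn_iff_infix sub t).2 h
      simp [hs]
  · rw [not_or] at h
    have h1 : PySem.Chars.isIn sub (c :: t) = false := by
      rw [PySem.Chars.isIn_eq_false_iff, List.infix_cons_iff]; tauto
    have h2 : PySem.Chars.startswith (c :: t) sub = false := by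
      cases hs : PySem.Chars.startswith (c :: t) sub
      · rfl
      · exact absurd ((PySem.Chars.startswith_iff (c :: t) sub).1 hs) h.1
    have h3 : PySem.Chars.isIn sub t = false := by
      cases hs : PySem.Chars.isIn sub t
      · rfl
      · exact absurd ((PySem.Chars.isIn_iff_infix sub t).1 hs) h.2
    simp [h1, h2, h3]

-- the whole-string min-fold of 'in' tests
def M (t : List Char) (b : Nat) : Nat :=
  mfold (fun k => PySem.Chars.isIn k.toList t) KWR b

-- the suffix scan computes exactly (M t b, periodOf (M t b))
theorem scanB_eq (t : List Char) (b : Nat) :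
    scanB t (b, periodOf b) = (M t b, periodOf (M t b)) := by
  induction t generalizing b with
  | nil =>
    have hall : ∀ e ∈ KWR, (fun k => PySem.Chars.isIn k.toList ([] : List Char)) e.1 = false := by
      decide
    rw [scanB, M, mfold_false _ _ _ hall]
  | cons c rest ih =>
    have hsplit : M (c :: rest) b
        = M rest (mfold (fun k => PySem.Chars.startswith (c :: rest) k.toList) KWR b) := by
      rw [M, M,
        mfold_congr (fun k => PySem.Chars.isIn k.toList (c :: rest))
          (fun k => PySem.Chars.startswith (c :: rest) k.toList || PySem.Chars.isIn k.toList rest)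
          KWR b (fun e _ => isIn_cons e.1.toList c rest)]
      exact mfold_or _ _ KWR b
    rw [scanB]
    by_cases hc : PySem.Set.contains FIRST_CHARS c = true
    · rw [if_pos hc, scanStep,
        pairfold_eq (fun k => PySem.Chars.startswith (c :: rest) k.toList) KEYWORDS
          (b, periodOf b) (by decide) rfl]
      rw [show (KEYWORDS.map fun e => (e.1, e.2.1)) = KWR from rfl]
      rw [ih, hsplit]
    · -- c starts no keyword: the step is a no-op and no keyword starts at this position
      have hc' : PySem.Set.contains FIRST_CHARS c = false := by
        cases h : PySem.Set.contains FIRST_CHARS c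
        · rfl
        · exact absurd h hc
      have hfacts : ∀ e ∈ KWR,
          e.1.toList ≠ [] ∧
            PySem.Set.contains FIRST_CHARS (e.1.toList.headD ' ') = true := by decide
      have hfalse : ∀ e ∈ KWR,
          (fun k => PySem.Chars.startswith (c :: rest) k.toList) e.1 = false := by
        intro e he
        obtain ⟨hne, hmem⟩ := hfacts e he
        cases hl : e.1.toList with
        | nil => exact absurd hl hne
        | cons k ks =>
          rw [hl] at hmem
          simp only [List.headD_cons] at hmem
          cases hs : PySem.Chars.startswith (c :: rest) (k :: ks)
          · simp [hl, hs]
          · have hk : k = c :=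
              (List.cons_prefix_cons.1 ((PySem.Chars.startswith_iff (c :: rest) (k :: ks)).1 hs)).1
            rw [hk] at hmem
            exact absurd hmem (by rw [hc']; exact Bool.false_ne_true)
      have hMM : M (c :: rest) b = M rest b := by
        rw [hsplit, mfold_false _ _ _ hfalse]
      rw [if_neg hc, ih, hMM]

theorem mfold_append (P : String → Bool) (L1 L2 : List (String × Nat)) (b : Nat) :
    mfold P (L1 ++ L2) b = mfold P L2 (mfold P L1 b) := by
  simp [mfold, List.foldl_append]

-- a same-rank keyword group collapses to one 'any' test
theorem mfold_group (P : String → Bool) (kws : List String) (r b : Nat) :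
    mfold P (kws.map fun k => (k, r)) b = if kws.any P then min b r else b := by
  induction kws generalizing b with
  | nil => simp [mfold]
  | cons k rest ih =>
    simp only [List.map_cons, mfold, List.foldl_cons, List.any_cons] at ih ⊢
    by_cases hp : P k = true
    · simp only [hp, if_true, Bool.true_or]
      rw [ih (min b r)]
      split_ifs <;> omega
    · simp only [hp, Bool.false_eq_true, if_false, Bool.false_or]
      exact ih b

-- the six-atom boolean skeleton: chain of anys vs. nested min-fold, ranks mapped to periods
theorem chain_eq (b0 b1 b2 b3 b4 b5 : Bool) :
    (if b0 then "16th-17th_century"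
     else if b1 then "18th_century"
     else if b2 then "19th_century"
     else if b3 then "20th_century"
     else if b4 then "Medieval_Byzantine"
     else if b5 then "Renaissance"
     else "Unknown_period")
    = periodOf
        (if b5 then
          min (if b4 then min (if b3 then min (if b2 then min (if b1 then
            min (if b0 then min 6 0 else 6) 1 else (if b0 then min 6 0 else 6)) 2
            else (if b1 then min (if b0 then min 6 0 else 6) 1 else (if b0 then min 6 0 else 6))) 3
            else (if b2 then min (if b1 then min (if b0 then min 6 0 else 6) 1
              else (if b0 then min 6 0 else 6)) 2
              else (if b1 then min (if b0 then min 6 0 else 6) 1 else (if b0 then min 6 0 else 6)))) 4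
            else (if b3 then min (if b2 then min (if b1 then min (if b0 then min 6 0 else 6) 1
              else (if b0 then min 6 0 else 6)) 2
              else (if b1 then min (if b0 then min 6 0 else 6) 1 else (if b0 then min 6 0 else 6))) 3
              else (if b2 then min (if b1 then min (if b0 then min 6 0 else 6) 1
                else (if b0 then min 6 0 else 6)) 2
                else (if b1 then min (if b0 then min 6 0 else 6) 1
                  else (if b0 then min 6 0 else 6))))) 5
         else
          (if b4 then min (if b3 then min (if b2 then min (if b1 then
            min (if b0 then min 6 0 else 6) 1 else (if b0 then min 6 0 else 6)) 2
            else (if b1 then min (if b0 then min 6 0 else 6) 1 else (if b0 then min 6 0 else 6))) 3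
            else (if b2 then min (if b1 then min (if b0 then min 6 0 else 6) 1
              else (if b0 then min 6 0 else 6)) 2
              else (if b1 then min (if b0 then min 6 0 else 6) 1 else (if b0 then min 6 0 else 6)))) 4
            else (if b3 then min (if b2 then min (if b1 then min (if b0 then min 6 0 else 6) 1
              else (if b0 then min 6 0 else 6)) 2
              else (if b1 then min (if b0 then min 6 0 else 6) 1 else (if b0 then min 6 0 else 6))) 3
              else (if b2 then min (if b1 then min (if b0 then min 6 0 else 6) 1
                else (if b0 then min 6 0 else 6)) 2
                else (if b1 then min (if b0 then min 6 0 else 6) 1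
                  else (if b0 then min 6 0 else 6)))))) := by
  cases b0 <;> cases b1 <;> cases b2 <;> cases b3 <;> cases b4 <;> cases b5 <;> rfl

-- the concrete table, split into its six same-rank groups
theorem KWR_split :
    KWR = (["16th", "xvii", "1500", "1600"].map fun k => (k, 0))
      ++ ((["18th", "xviii", "1700"].map fun k => (k, 1))
      ++ ((["19th", "xix", "1800"].map fun k => (k, 2))
      ++ ((["20th", "xx", "1900"].map fun k => (k, 3))
      ++ ((["medieval", "byzantine"].map fun k => (k, 4))
      ++ (["renaissance"].map fun k => (k, 5)))))) := rfl

-- ===== VERDICT (by name: the statement is the Claim_ definition above) =====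
theorem extract_period_from_title_spec : Claim_equal_extract_period_from_title := by
  intro title _
  unfold Spec_extract_period_from_title
  simp only [extract_period_from_title, extract_period_from_title_alt]
  rw [show ((6 : Nat), ("Unknown_period" : String)) = ((6 : Nat), periodOf 6) from rfl, scanB_eq]
  rw [M, KWR_split, mfold_append, mfold_append, mfold_append, mfold_append, mfold_append,
    mfold_group, mfold_group, mfold_group, mfold_group, mfold_group, mfold_group]
  simp only [PySem.Str.isIn_eq]
  exact chain_eq _ _ _ _ _ _
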